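-- pv_equiv track=rewrite | github.com/kimtaejin3/baekjoon-TILs | 백준/Gold/13397. 구간 나누기 2/구간 나누기 2.py | solve
-- ===== SOURCE A (Python) =====
-- def can_divide(arr, m, max_diff):
--     count = 1
--     current_min = arr[0]
--     current_max = arr[0]
--
--     for num in arr:
--         if num < current_min:
--             current_min = num
--         if num > current_max:
--             current_max = num
--
--         if current_max - current_min > max_diff:
--             count += 1
--             current_min = num
--             current_max = num
--
--     return count <= m
--
-- def solve(n, m, arr):
--     left = 0
--     right = max(arr) - min(arr)
--
--     result = right
--     while left <= right:
--         mid = (left + right) // 2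
--         if can_divide(arr, m, mid):
--             result = mid
--             right = mid - 1
--         else:
--             left = mid + 1
--
--     return result
-- ===== SOURCE B (Python) =====
-- def solve(n, m, arr):
--     N = len(arr)
--     k = m if m < N else N
--     if k < 1:
--         raise ValueError("need a nonempty array and m >= 1")
--     # C[t][i - t - 1] = max(arr[t:i]) - min(arr[t:i])  (cost of segment arr[t:i])
--     C = []
--     for t in range(N):
--         lo = hi = arr[t]
--         rowc = []
--         for x in arr[t:]:
--             if x < lo:
--                 lo = x
--             if x > hi:
--                 hi = x
--             rowc.append(hi - lo)
--         C.append(rowc)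
--     # dp row for j segments: row[i] = min over exact-j partitions of arr[:i]
--     # of the largest segment cost (valid for j <= i <= N; smaller i unused).
--     row = [0] + C[0]
--     best = row[N]
--     for j in range(2, k + 1):
--         new = [0] * j
--         for i in range(j, N + 1):
--             v = None
--             for t in range(j - 1, i):
--                 c = row[t] if row[t] > C[t][i - t - 1] else C[t][i - t - 1]
--                 if v is None or c < v:
--                     v = c
--             new.append(v)
--         row = new
--         if row[N] < best:
--             best = row[N]
--     return best
-- ===== Notes on version B (the rewrite author's own statement) =====
-- stated objective: alternative
-- what changed: Replaces binary-search-on-the-answer with greedy feasibility checks by an exact dynamic program dp[j][i] = minimal largest segment cost splitting the first i elements into exactly j segments (segment costs precomputed), returning the minimum of dp[j][n] over j = 1..min(m,n).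
-- outside the precondition, e.g. on solve(2, 0, [1, 3]): A returns 2, B raises ValueError
import Mathlib
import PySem

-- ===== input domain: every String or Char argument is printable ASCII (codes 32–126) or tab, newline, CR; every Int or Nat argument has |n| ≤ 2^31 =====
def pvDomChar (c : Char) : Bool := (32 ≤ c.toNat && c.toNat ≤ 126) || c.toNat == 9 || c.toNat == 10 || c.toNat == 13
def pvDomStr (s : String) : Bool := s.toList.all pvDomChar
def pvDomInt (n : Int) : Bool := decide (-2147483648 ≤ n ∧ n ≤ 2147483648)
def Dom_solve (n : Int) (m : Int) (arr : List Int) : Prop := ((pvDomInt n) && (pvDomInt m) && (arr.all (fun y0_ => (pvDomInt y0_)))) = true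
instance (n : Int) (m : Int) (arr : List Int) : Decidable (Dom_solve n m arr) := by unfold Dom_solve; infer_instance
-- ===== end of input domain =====

-- B replaces A's binary search on the answer (with a greedy feasibility check) by an exact
-- dynamic program over (number of segments, prefix length); alternative algorithm, not faster.

-- ===== PORT A =====
-- one step of can_divide's for-loop; state = (count, current_min, current_max)
def stepA (maxDiff : Int) (st : Int × Int × Int) (num : Int) : Int × Int × Int :=
  let cmin := if num < st.2.1 then num else st.2.1
  let cmax := if num > st.2.2 then num else st.2.2
  if cmax - cmin > maxDiff then (st.1 + 1, num, num) else (st.1, cmin, cmax)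

def canDivide (arr : List Int) (m : Int) (maxDiff : Int) : Bool :=
  match arr with
  | [] => false          -- Python raises IndexError on arr[0] here; excluded by Pre_
  | a0 :: _ => decide ((arr.foldl (stepA maxDiff) (1, a0, a0)).1 ≤ m)

-- the while-loop of solve
def bsearchA (arr : List Int) (m left right result : Int) : Int :=
  if h : left ≤ right then
    let mid := PySem.Int.floordiv (left + right) 2
    if canDivide arr m mid then
      bsearchA arr m left (mid - 1) mid
    else
      bsearchA arr m (mid + 1) right result
  else result
termination_by (right + 1 - left).toNat
decreasing_by
  · have := PySem.Int.floordiv_two_mid_bounds h; omega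
  · have := PySem.Int.floordiv_two_mid_bounds h; omega

def solve (n : Int) (m : Int) (arr : List Int) : Int :=
  match PySem.List.max? arr (fun y => y), PySem.List.min? arr (fun y => y) with
  | some mx, some mn => bsearchA arr m 0 (mx - mn) (mx - mn)
  | _, _ => 0          -- Python raises ValueError (max of empty sequence) here; excluded by Pre_

-- ===== PORT B =====
-- rowc for a fixed t: running min/max over arr[t:], appending hi - lo
-- one step of the rowc-building loop; state = (lo, hi, rowc)
def costStep (st : Int × Int × List Int) (x : Int) : Int × Int × List Int :=
  let lo := if x < st.1 then x else st.1
  let hi := if x > st.2.1 then x else st.2.1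
  (lo, hi, st.2.2 ++ [hi - lo])

def costRow (arr : List Int) (t : Int) : List Int :=
  let a := PySem.List.pyGetD arr t 0
  ((PySem.List.slice arr (some t) none).foldl costStep (a, a, [])).2.2

def costTable (arr : List Int) : List (List Int) :=
  (PySem.List.pyRange 0 (PySem.List.len arr) 1).foldl (fun C t => C ++ [costRow arr t]) []

-- the inner  min(... for t in range(j-1, i))  loop (v starts as None)
-- one step of the  for t in range(j-1, i)  loop (v is None until the first candidate)
def minStep (row : List Int) (C : List (List Int)) (i : Int) (v : Option Int) (t : Int) : Option Int :=
  let ct := PySem.List.pyGetD (PySem.List.pyGetD C t []) (i - t - 1) 0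
  let rt := PySem.List.pyGetD row t 0
  let c := if rt > ct then rt else ct
  match v with
  | none => some c
  | some v0 => if c < v0 then some c else some v0

def innerMin (row : List Int) (C : List (List Int)) (j i : Int) : Int :=
  ((PySem.List.pyRange (j - 1) i 1).foldl (minStep row C i) none).getD 0

-- new = [0]*j  followed by appending innerMin for i in range(j, N+1)
def newRow (arr row : List Int) (C : List (List Int)) (j : Int) : List Int :=
  (PySem.List.pyRange j (PySem.List.len arr + 1) 1).foldl
    (fun acc i => acc ++ [innerMin row C j i]) (List.replicate j.toNat 0)

-- the  for j in range(2, k+1)  loop carrying (row, best)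
def dpLoop (arr : List Int) (C : List (List Int)) (k : Int) (row : List Int) (best : Int) (j : Int) : Int :=
  if j ≤ k then
    let row' := newRow arr row C j
    let r := PySem.List.pyGetD row' (PySem.List.len arr) 0
    dpLoop arr C k row' (if r < best then r else best) (j + 1)
  else best
termination_by (k + 1 - j).toNat
decreasing_by omega

def solve_alt (n : Int) (m : Int) (arr : List Int) : Int :=
  let N : Int := PySem.List.len arr
  let k := if m < N then m else N
  if k < 1 then 0     -- Python raises ValueError here; excluded by Pre_
  else
    let C := costTable arr
    let row := 0 :: PySem.List.pyGetD C 0 []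
    let best := PySem.List.pyGetD row N 0
    dpLoop arr C k row best 2

-- ===== PRECONDITION & SPEC =====
-- Pre_ restricts to the problem's natural domain (a nonempty array, at least one allowed
-- segment): on empty arr both programs raise, and for m < 1 A's value max(arr)-min(arr) is an
-- accident of its search bounds while B raises; these inputs are excluded.
def Pre_solve (n : Int) (m : Int) (arr : List Int) : Prop := arr ≠ [] ∧ 1 ≤ m
instance (n : Int) (m : Int) (arr : List Int) : Decidable (Pre_solve n m arr) := by unfold Pre_solve; infer_instance

def pvWitness_solve : Int × Int × List Int := (4, 2, [1, 5, 2, 6])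

def Spec_solve (n : Int) (m : Int) (arr : List Int) (out : Int) : Prop := out = solve_alt n m arr
instance (n : Int) (m : Int) (arr : List Int) (out : Int) : Decidable (Spec_solve n m arr out) := by unfold Spec_solve; infer_instance

-- ===== CLAIM (what is proved, stated in full; the proofs are below) =====
def Claim_equal_solve : Prop := ∀ (n : Int) (m : Int) (arr : List Int), Dom_solve n m arr → Pre_solve n m arr → Spec_solve n m arr (solve n m arr)

-- ===== LEMMAS AND PROOFS =====

-- ---------- spec layer: segment costs, partitions, feasibility ----------
def minL : List Int → Int
  | [] => 0
  | x :: t => t.foldl min x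

def maxL : List Int → Int
  | [] => 0
  | x :: t => t.foldl max x

def mcost (p : List Int) : Int := maxL p - minL p

def GoodParts (d : Int) (parts : List (List Int)) : Prop :=
  ∀ p ∈ parts, p ≠ [] ∧ mcost p ≤ d

def ExactFeas (xs : List Int) (j : Nat) (d : Int) : Prop :=
  ∃ parts, parts.flatten = xs ∧ parts.length = j ∧ GoodParts d parts

def Feas (xs : List Int) (m d : Int) : Prop :=
  ∃ j : Nat, 1 ≤ j ∧ (j : Int) ≤ m ∧ ExactFeas xs j d

def OptTo (arr : List Int) (i j : Nat) (v : Int) : Prop :=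
  ExactFeas (arr.take i) j v ∧ ∀ d, ExactFeas (arr.take i) j d → v ≤ d

def RowOK (arr : List Int) (j : Nat) (row : List Int) : Prop :=
  ∀ i : Nat, j ≤ i → i ≤ arr.length → OptTo arr i j (PySem.List.pyGetD row (i : Int) 0)

def BestOK (arr : List Int) (jmax : Nat) (best : Int) : Prop :=
  (∃ j', 1 ≤ j' ∧ j' ≤ jmax ∧ ExactFeas arr j' best) ∧
  (∀ (j' : Nat) (d : Int), 1 ≤ j' → j' ≤ jmax → ExactFeas arr j' d → best ≤ d)

-- ---------- basic foldl min/max facts ----------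
lemma foldl_min_le_init (t : List Int) : ∀ x : Int, t.foldl min x ≤ x := by
  induction t with
  | nil => intro x; simp
  | cons y t ih => intro x; exact le_trans (ih (min x y)) (min_le_left _ _)

lemma init_le_foldl_max (t : List Int) : ∀ x : Int, x ≤ t.foldl max x := by
  induction t with
  | nil => intro x; simp
  | cons y t ih => intro x; exact le_trans (le_max_left _ _) (ih (max x y))

lemma minL_le_maxL (p : List Int) : minL p ≤ maxL p := by
  cases p with
  | nil => simp [minL, maxL]
  | cons x t => exact le_trans (foldl_min_le_init t x) (init_le_foldl_max t x)

lemma mcost_nonneg (p : List Int) : 0 ≤ mcost p := by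
  have := minL_le_maxL p; unfold mcost; omega

lemma minL_append_singleton (p : List Int) (hp : p ≠ []) (y : Int) :
    minL (p ++ [y]) = min (minL p) y := by
  cases p with
  | nil => exact absurd rfl hp
  | cons x t => simp [minL, List.foldl_append]

lemma maxL_append_singleton (p : List Int) (hp : p ≠ []) (y : Int) :
    maxL (p ++ [y]) = max (maxL p) y := by
  cases p with
  | nil => exact absurd rfl hp
  | cons x t => simp [maxL, List.foldl_append]

lemma numparts_le_flatten_length (parts : List (List Int)) (d : Int)
    (hg : GoodParts d parts) : parts.length ≤ parts.flatten.length := by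
  induction parts with
  | nil => simp
  | cons p ps ih =>
    have hp := (hg p (by simp)).1
    have h1 : 1 ≤ p.length := by
      cases p with
      | nil => exact absurd rfl hp
      | cons a t => simp
    have := ih (fun q hq => hg q (by simp [hq]))
    simp only [List.flatten_cons, List.length_append, List.length_cons]
    omega

lemma ExactFeas_mono (xs : List Int) (j : Nat) (d d' : Int) (hdd : d ≤ d')
    (h : ExactFeas xs j d) : ExactFeas xs j d' := by
  obtain ⟨parts, h1, h2, h3⟩ := h
  exact ⟨parts, h1, h2, fun p hp => ⟨(h3 p hp).1, le_trans (h3 p hp).2 hdd⟩⟩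

lemma ExactFeas_nonneg (xs : List Int) (j : Nat) (d : Int) (hx : xs ≠ [])
    (h : ExactFeas xs j d) : 0 ≤ d := by
  obtain ⟨parts, h1, h2, h3⟩ := h
  cases parts with
  | nil => exact absurd h1.symm (by simpa using hx)
  | cons p ps =>
    have := (h3 p (by simp)).2
    have := mcost_nonneg p
    omega

lemma ExactFeas_le_length (xs : List Int) (j : Nat) (d : Int)
    (h : ExactFeas xs j d) : j ≤ xs.length := by
  obtain ⟨parts, h1, h2, h3⟩ := h
  have := numparts_le_flatten_length parts d h3
  rw [h1, h2] at this
  exact this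

lemma ExactFeas_whole (xs : List Int) (hx : xs ≠ []) : ExactFeas xs 1 (mcost xs) :=
  ⟨[xs], by simp, by simp, by intro p hp; simp at hp; subst hp; exact ⟨hx, le_refl _⟩⟩

lemma ExactFeas_one_min (xs : List Int) (d : Int) (h : ExactFeas xs 1 d) : mcost xs ≤ d := by
  obtain ⟨parts, h1, h2, h3⟩ := h
  match parts, h2 with
  | [p], _ =>
    simp at h1
    subst h1
    exact (h3 p (by simp)).2

-- appending one more segment to an exact partition
lemma ExactFeas_append (xs seg : List Int) (j : Nat) (d : Int)
    (h : ExactFeas xs j d) (hseg : seg ≠ []) (hc : mcost seg ≤ d) :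
    ExactFeas (xs ++ seg) (j + 1) d := by
  obtain ⟨parts, h1, h2, h3⟩ := h
  refine ⟨parts ++ [seg], by simp [h1], by simp [h2], ?_⟩
  intro p hp
  rcases List.mem_append.1 hp with hp | hp
  · exact h3 p hp
  · simp at hp; subst hp; exact ⟨hseg, hc⟩

-- splitting the last segment off an exact partition of  arr.take i
lemma ExactFeas_split (arr : List Int) (i j : Nat) (d : Int)
    (hiN : i ≤ arr.length) (h : ExactFeas (arr.take i) (j + 1) d) :
    ∃ t : Nat, j ≤ t ∧ t < i ∧ ExactFeas (arr.take t) j d ∧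
      mcost ((arr.drop t).take (i - t)) ≤ d := by
  obtain ⟨parts, hfl, hlen, hg⟩ := h
  rcases List.eq_nil_or_concat parts with rfl | ⟨init, last, rfl⟩
  · simp at hlen
  · have hinitlen : init.length = j := by simp at hlen; omega
    have hlast := hg last (by simp)
    have hginit : GoodParts d init := fun p hp => hg p (by simp [hp])
    have hflat : init.flatten ++ last = arr.take i := by simpa using hfl
    have htake_len : (arr.take i).length = i := by simp; omega
    have hlast_len : 1 ≤ last.length := by
      cases last with
      | nil => exact absurd rfl hlast.1
      | cons a t => simp
    have hti : init.flatten.length + last.length = i := by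
      have := congrArg List.length hflat
      rw [List.length_append, htake_len] at this
      exact this
    have htj : j ≤ init.flatten.length := by
      have := numparts_le_flatten_length init d hginit
      omega
    have hflatinit : init.flatten = arr.take init.flatten.length := by
      conv_lhs => rw [← List.take_left (l₁ := init.flatten) (l₂ := last)]
      rw [hflat, List.take_take, min_eq_left (by omega)]
    have hlasteq : last = (arr.drop init.flatten.length).take (i - init.flatten.length) := by
      have h2 : last = (arr.take i).drop init.flatten.length := by
        rw [← hflat, List.drop_left]
      rw [h2, List.drop_take]
    refine ⟨init.flatten.length, htj, by omega, ⟨init, hflatinit, hinitlen, hginit⟩, ?_⟩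
    rw [← hlasteq]
    exact hlast.2

-- ---------- greedy (port A) facts ----------
lemma stepA_no_split (d lo hi c y : Int) (h : max hi y - min lo y ≤ d) :
    stepA d (c, lo, hi) y = (c, min lo y, max hi y) := by
  simp only [stepA]
  have h1 : (if y < lo then y else lo) = min lo y := by omega
  have h2 : (if y > hi then y else hi) = max hi y := by omega
  have hc : ¬ (max hi y - min lo y > d) := by omega
  rw [h1, h2, if_neg hc]

lemma stepA_split (d lo hi c y : Int) (h : d < max hi y - min lo y) :
    stepA d (c, lo, hi) y = (c + 1, y, y) := by
  simp only [stepA]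
  have h1 : (if y < lo then y else lo) = min lo y := by omega
  have h2 : (if y > hi then y else hi) = max hi y := by omega
  have hc : (max hi y - min lo y > d) := by omega
  rw [h1, h2, if_pos hc]

-- a whole-run without splits
lemma foldA_no_split (d : Int) : ∀ (ys : List Int) (c lo hi : Int),
    ys.foldl max hi - ys.foldl min lo ≤ d →
    ys.foldl (stepA d) (c, lo, hi) = (c, ys.foldl min lo, ys.foldl max hi) := by
  intro ys
  induction ys with
  | nil => intro c lo hi _; simp
  | cons y yt ih =>
    intro c lo hi h
    have hmin : yt.foldl min (min lo y) ≤ min lo y := foldl_min_le_init yt _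
    have hmax : max hi y ≤ yt.foldl max (max hi y) := init_le_foldl_max yt _
    simp only [List.foldl_cons] at h ⊢
    rw [stepA_no_split d lo hi c y (by omega)]
    exact ih c (min lo y) (max hi y) h

-- dominance between greedy states, preserved by stepA
def DomSt (s s' : Int × Int × Int) : Prop :=
  s.1 < s'.1 ∨ (s.1 = s'.1 ∧ s'.2.1 ≤ s.2.1 ∧ s.2.2 ≤ s'.2.2)

lemma DomSt_step (d y : Int) (s s' : Int × Int × Int) (h : DomSt s s') :
    DomSt (stepA d s y) (stepA d s' y) := by
  obtain ⟨c, lo, hi⟩ := s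
  obtain ⟨c', lo', hi'⟩ := s'
  by_cases h1 : max hi y - min lo y ≤ d <;> by_cases h2 : max hi' y - min lo' y ≤ d
  · rw [stepA_no_split d lo hi c y h1, stepA_no_split d lo' hi' c' y h2]
    unfold DomSt at h ⊢; simp at h ⊢; omega
  · rw [stepA_no_split d lo hi c y h1, stepA_split d lo' hi' c' y (by omega)]
    unfold DomSt at h ⊢; simp at h ⊢; omega
  · rw [stepA_split d lo hi c y (by omega), stepA_no_split d lo' hi' c' y h2]
    unfold DomSt at h ⊢; simp at h ⊢; omega
  · rw [stepA_split d lo hi c y (by omega), stepA_split d lo' hi' c' y (by omega)]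
    unfold DomSt at h ⊢; simp at h ⊢; omega

lemma DomSt_fold (d : Int) (ys : List Int) : ∀ s s', DomSt s s' →
    DomSt (ys.foldl (stepA d) s) (ys.foldl (stepA d) s') := by
  induction ys with
  | nil => intro s s' h; exact h
  | cons y yt ih => intro s s' h; exact ih _ _ (DomSt_step d y s s' h)

lemma DomSt_count (s s' : Int × Int × Int) (h : DomSt s s') : s.1 ≤ s'.1 := by
  unfold DomSt at h; omega

-- the first fold step is a no-op when 0 ≤ d
lemma foldA_first_step (d c a : Int) (hd : 0 ≤ d) :
    stepA d (c, a, a) a = (c, a, a) := by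
  rw [stepA_no_split d a a c a (by omega)]; simp

-- greedy count is at most the size of any good partition (optimality direction)
lemma greedy_le_parts (d : Int) (hd : 0 ≤ d) :
    ∀ (parts : List (List Int)), parts ≠ [] → GoodParts d parts →
    ∀ (c : Int) (h : Int) (tl : List Int), parts.flatten = h :: tl →
    ((h :: tl).foldl (stepA d) (c, h, h)).1 ≤ c + parts.length - 1 := by
  intro parts
  induction parts with
  | nil => intro h; exact absurd rfl h
  | cons p rest ih =>
    intro _ hg c h tl hfl
    have hpne := (hg p (by simp)).1
    have hpc := (hg p (by simp)).2
    obtain ⟨pt, rfl, htl⟩ : ∃ pt, p = h :: pt ∧ tl = pt ++ rest.flatten := by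
      cases p with
      | nil => exact absurd rfl hpne
      | cons a pt =>
        simp only [List.flatten_cons, List.cons_append, List.cons.injEq] at hfl
        exact ⟨pt, by rw [hfl.1], hfl.2.symm⟩
    subst htl
    have hrun : pt.foldl (stepA d) (c, h, h) = (c, pt.foldl min h, pt.foldl max h) := by
      apply foldA_no_split
      have : mcost (h :: pt) ≤ d := hpc
      simpa [mcost, maxL, minL] using this
    rw [List.foldl_cons, foldA_first_step d c h hd, List.foldl_append, hrun]
    cases rest with
    | nil => simp
    | cons q rest' =>
      have hqne := (hg q (by simp)).1
      obtain ⟨h', tl', hfl'⟩ : ∃ h' tl', (q :: rest').flatten = h' :: tl' := by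
        cases q with
        | nil => exact absurd rfl hqne
        | cons b qt => exact ⟨b, qt ++ rest'.flatten, by simp⟩
      rw [hfl']
      have hdom : DomSt (c, pt.foldl min h, pt.foldl max h) (c + 1, h', h') := by
        unfold DomSt; left; simp
      have := DomSt_count _ _ (DomSt_fold d (h' :: tl') _ _ hdom)
      have hih := ih (by simp) (fun p hp => hg p (by simp [hp])) (c + 1) h' tl' hfl'
      simp only [List.length_cons] at hih ⊢
      omega

-- building a good partition out of a greedy run (feasibility direction)
lemma greedy_build (d : Int) (hd : 0 ≤ d) :
    ∀ (ys : List Int) (parts0 : List (List Int)) (last0 : List Int),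
    last0 ≠ [] → GoodParts d parts0 → maxL last0 - minL last0 ≤ d →
    ∃ (parts1 : List (List Int)) (last1 : List Int),
      ys.foldl (stepA d) ((parts0.length : Int) + 1, minL last0, maxL last0) =
        ((parts1.length : Int) + 1, minL last1, maxL last1) ∧
      parts1.flatten ++ last1 = parts0.flatten ++ last0 ++ ys ∧
      GoodParts d parts1 ∧ last1 ≠ [] ∧ maxL last1 - minL last1 ≤ d := by
  intro ys
  induction ys with
  | nil =>
    intro parts0 last0 h1 h2 h3
    exact ⟨parts0, last0, by simp, by simp, h2, h1, h3⟩
  | cons y yt ih =>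
    intro parts0 last0 h1 h2 h3
    rw [List.foldl_cons]
    by_cases hsplit : max (maxL last0) y - min (minL last0) y ≤ d
    · rw [stepA_no_split d _ _ _ y hsplit]
      have hmin := minL_append_singleton last0 h1 y
      have hmax := maxL_append_singleton last0 h1 y
      rw [← hmin, ← hmax]
      obtain ⟨parts1, last1, e1, e2, e3, e4, e5⟩ :=
        ih parts0 (last0 ++ [y]) (by simp) h2 (by rw [hmin, hmax]; omega)
      exact ⟨parts1, last1, e1, by rw [e2]; simp, e3, e4, e5⟩
    · rw [stepA_split d _ _ _ y (by omega)]
      have h2' : GoodParts d (parts0 ++ [last0]) := by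
        intro p hp
        rcases List.mem_append.1 hp with hp | hp
        · exact h2 p hp
        · simp at hp; subst hp; exact ⟨h1, h3⟩
      obtain ⟨parts1, last1, e1, e2, e3, e4, e5⟩ :=
        ih (parts0 ++ [last0]) [y] (by simp) h2' (by simpa [minL, maxL] using hd)
      have hst : ((((parts0 ++ [last0]).length : Nat) : Int) + 1, minL [y], maxL [y]) =
          ((parts0.length : Int) + 1 + 1, y, y) := by
        simp [minL, maxL]
      rw [hst] at e1
      exact ⟨parts1, last1, e1, by rw [e2]; simp, e3, e4, e5⟩

lemma canDivide_iff (arr : List Int) (m d : Int) (ha : arr ≠ []) (hd : 0 ≤ d) :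
    canDivide arr m d = true ↔ Feas arr m d := by
  obtain ⟨a0, rest, rfl⟩ : ∃ a b, arr = a :: b := by
    cases arr with
    | nil => exact absurd rfl ha
    | cons a b => exact ⟨a, b, rfl⟩
  rw [show canDivide (a0 :: rest) m d =
      decide (((a0 :: rest).foldl (stepA d) (1, a0, a0)).1 ≤ m) from rfl]
  rw [List.foldl_cons, foldA_first_step d 1 a0 hd, decide_eq_true_iff]
  constructor
  · intro h
    obtain ⟨parts1, last1, e1, e2, e3, e4, e5⟩ :=
      greedy_build d hd rest [] [a0] (by simp) (by intro p hp; simp at hp) (by simpa [minL, maxL] using hd)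
    have e1' : rest.foldl (stepA d) (1, a0, a0) = ((parts1.length : Int) + 1, minL last1, maxL last1) := by
      rw [← e1]; congr 1
    rw [e1'] at h
    refine ⟨parts1.length + 1, by omega, by push_cast; push_cast at h; omega,
      parts1 ++ [last1], by simpa using e2, by simp, ?_⟩
    intro p hp
    rcases List.mem_append.1 hp with hp | hp
    · exact e3 p hp
    · simp at hp; subst hp; exact ⟨e4, e5⟩
  · rintro ⟨j, hj1, hjm, parts, hfl, hlen, hg⟩
    have hne : parts ≠ [] := by
      intro hcon
      rw [hcon] at hfl
      simp at hfl
    have := greedy_le_parts d hd parts hne hg 1 a0 rest hfl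
    rw [List.foldl_cons, foldA_first_step d 1 a0 hd] at this
    rw [hlen] at this
    omega

-- ---------- binary search ----------
lemma bsearch_eq (arr : List Int) (m ans : Int)
    (hans0 : 0 ≤ ans)
    (hP : canDivide arr m ans = true)
    (hleast : ∀ d : Int, 0 ≤ d → d < ans → canDivide arr m d ≠ true)
    (hmono : ∀ d d' : Int, 0 ≤ d → d ≤ d' → canDivide arr m d = true → canDivide arr m d' = true) :
    ∀ (fuel : Nat) (left right result : Int), (right + 1 - left).toNat ≤ fuel →
      0 ≤ left → left ≤ ans → (right < ans → result = ans) →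
      bsearchA arr m left right result = ans := by
  intro fuel
  induction fuel with
  | zero =>
    intro left right result hf h0 hla hr
    rw [bsearchA]
    rw [dif_neg (by omega)]
    exact hr (by omega)
  | succ fuel ih =>
    intro left right result hf h0 hla hr
    rw [bsearchA]
    by_cases hlr : left ≤ right
    · rw [dif_pos hlr]
      have hmid := PySem.Int.floordiv_two_mid_bounds hlr
      set mid := PySem.Int.floordiv (left + right) 2 with hmiddef
      by_cases hcd : canDivide arr m mid = true
      · rw [if_pos hcd]
        have hansmid : ans ≤ mid := by
          by_contra hcon
          exact hleast mid (by omega) (by omega) hcd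
        exact ih left (mid - 1) mid (by omega) h0 hla (by omega)
      · rw [if_neg hcd]
        have hmidans : mid < ans := by
          by_contra hcon
          exact hcd (hmono ans mid hans0 (by omega) hP)
        exact ih (mid + 1) right result (by omega) (by omega) (by omega) hr
    · rw [dif_neg hlr]
      exact hr (by omega)

-- ---------- cost table (port B) facts ----------
lemma costFold : ∀ (ys : List Int) (acc : List Int) (p : List Int), p ≠ [] →
    (ys.foldl costStep (minL p, maxL p, acc)).2.2 =
      acc ++ (List.range ys.length).map (fun d => mcost (p ++ ys.take (d + 1))) := by
  intro ys
  induction ys with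
  | nil => intro acc p hp; simp
  | cons y yt ih =>
    intro acc p hp
    simp only [List.foldl_cons]
    have hstep : costStep (minL p, maxL p, acc) y =
        (minL (p ++ [y]), maxL (p ++ [y]), acc ++ [mcost (p ++ [y])]) := by
      simp only [costStep, minL_append_singleton p hp y, maxL_append_singleton p hp y, mcost]
      have h1 : (if y < minL p then y else minL p) = min (minL p) y := by omega
      have h2 : (if y > maxL p then y else maxL p) = max (maxL p) y := by omega
      rw [h1, h2]
    rw [hstep, ih (acc ++ [mcost (p ++ [y])]) (p ++ [y]) (by simp)]
    rw [List.length_cons, List.range_succ_eq_map, List.map_cons, List.map_map]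
    simp [Function.comp, List.take_succ_cons, List.append_assoc]

lemma costRow_spec (arr : List Int) (t : Nat) (ht : t < arr.length) :
    costRow arr (t : Int) =
      (List.range (arr.length - t)).map (fun d => mcost ((arr.drop t).take (d + 1))) := by
  obtain ⟨a, rest, hdrop⟩ : ∃ a rest, arr.drop t = a :: rest := by
    cases hh : arr.drop t with
    | nil =>
      have := congrArg List.length hh
      simp at this
      omega
    | cons a rest => exact ⟨a, rest, rfl⟩
  have h0 : arr[t]? = some a := by
    rw [← List.head?_drop, hdrop]
    rfl
  have hget : PySem.List.pyGetD arr (t : Int) 0 = a := by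
    rw [PySem.List.pyGetD_natCast, List.getD_eq_getElem?_getD, h0]
    rfl
  have hbody : costRow arr (t : Int) =
      ((a :: rest).foldl costStep (a, a, [])).2.2 := by
    unfold costRow
    rw [PySem.List.slice_from_natCast, hdrop, hget]
  rw [hbody, List.foldl_cons]
  have hstep : costStep (a, a, []) a = (minL [a], maxL [a], [mcost [a]]) := by
    simp [costStep, minL, maxL, mcost]
  rw [hstep, costFold rest [mcost [a]] [a] (by simp)]
  have hlen : arr.length - t = rest.length + 1 := by
    have := congrArg List.length hdrop
    simp at this
    omega
  rw [hlen, List.range_succ_eq_map, List.map_cons, List.map_map]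
  simp [Function.comp, hdrop, List.take_succ_cons]

lemma costTable_get (arr : List Int) (t : Nat) (ht : t < arr.length) :
    PySem.List.pyGetD (costTable arr) (t : Int) [] = costRow arr (t : Int) := by
  unfold costTable
  simp only [PySem.List.len_eq]
  rw [PySem.List.foldl_append_singleton_eq_map, List.nil_append]
  exact PySem.List.pyGetD_map_pyRange (costRow arr) arr.length t [] ht

lemma ctab_get (arr : List Int) (t i : Nat) (ht : t < i) (hi : i ≤ arr.length) :
    PySem.List.pyGetD (PySem.List.pyGetD (costTable arr) (t : Int) []) ((i : Int) - t - 1) 0 =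
      mcost ((arr.drop t).take (i - t)) := by
  rw [costTable_get arr t (by omega), costRow_spec arr t (by omega)]
  have h2 : (i : Int) - t - 1 = ((i - t - 1 : Nat) : Int) := by push_cast; omega
  rw [h2, PySem.List.pyGetD_natCast, List.getD_eq_getElem?_getD]
  rw [List.getElem?_map, List.getElem?_range (show i - t - 1 < arr.length - t by omega)]
  simp only [Option.map_some, Option.getD_some]
  rw [show i - t - 1 + 1 = i - t from by omega]

-- ---------- inner min loop ----------
lemma minStep_some (row : List Int) (C : List (List Int)) (i : Int) (v0 t : Int) :
    minStep row C i (some v0) t =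
      some (min v0 (max (PySem.List.pyGetD row t 0)
        (PySem.List.pyGetD (PySem.List.pyGetD C t []) (i - t - 1) 0))) := by
  simp only [minStep]
  have : (if PySem.List.pyGetD row t 0 > PySem.List.pyGetD (PySem.List.pyGetD C t []) (i - t - 1) 0
      then PySem.List.pyGetD row t 0
      else PySem.List.pyGetD (PySem.List.pyGetD C t []) (i - t - 1) 0) =
      max (PySem.List.pyGetD row t 0) (PySem.List.pyGetD (PySem.List.pyGetD C t []) (i - t - 1) 0) := by
    omega
  rw [this]
  have : (if max (PySem.List.pyGetD row t 0) (PySem.List.pyGetD (PySem.List.pyGetD C t []) (i - t - 1) 0) < v0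
      then some (max (PySem.List.pyGetD row t 0) (PySem.List.pyGetD (PySem.List.pyGetD C t []) (i - t - 1) 0))
      else some v0) = some (min v0 (max (PySem.List.pyGetD row t 0) (PySem.List.pyGetD (PySem.List.pyGetD C t []) (i - t - 1) 0))) := by
    split <;> simp <;> omega
  rw [this]

-- candidate value read by the loop at index t
def candV (row : List Int) (C : List (List Int)) (i t : Int) : Int :=
  max (PySem.List.pyGetD row t 0) (PySem.List.pyGetD (PySem.List.pyGetD C t []) (i - t - 1) 0)

lemma minFold_some (row : List Int) (C : List (List Int)) (i : Int) :
    ∀ (l : List Int) (v0 : Int),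
      l.foldl (minStep row C i) (some v0) =
        some (l.foldl (fun a t => min a (candV row C i t)) v0) := by
  intro l
  induction l with
  | nil => intro v0; rfl
  | cons t l ih => intro v0; rw [List.foldl_cons, minStep_some, ih]; rfl

lemma innerMin_eq (row : List Int) (C : List (List Int)) (j i : Int) (h : j - 1 < i) :
    innerMin row C j i =
      (PySem.List.pyRange j i 1).foldl (fun a t => min a (candV row C i t)) (candV row C i (j - 1)) := by
  unfold innerMin
  rw [PySem.List.pyRange_one_cons h, List.foldl_cons]
  have : minStep row C i none (j - 1) = some (candV row C i (j - 1)) := by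
    simp only [minStep, candV]
    have : (if PySem.List.pyGetD row (j-1) 0 > PySem.List.pyGetD (PySem.List.pyGetD C (j-1) []) (i - (j-1) - 1) 0
        then PySem.List.pyGetD row (j-1) 0
        else PySem.List.pyGetD (PySem.List.pyGetD C (j-1) []) (i - (j-1) - 1) 0) =
        max (PySem.List.pyGetD row (j-1) 0) (PySem.List.pyGetD (PySem.List.pyGetD C (j-1) []) (i - (j-1) - 1) 0) := by
      omega
    rw [this]
  rw [this, minFold_some]
  have h1 : j - 1 + 1 = j := by omega
  rw [h1, Option.getD_some]

lemma foldl_fmin_le_init (f : Int → Int) : ∀ (l : List Int) (v0 : Int),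
    l.foldl (fun a t => min a (f t)) v0 ≤ v0 := by
  intro l
  induction l with
  | nil => intro v0; simp
  | cons s l ih =>
    intro v0
    rw [List.foldl_cons]
    exact le_trans (ih _) (min_le_left _ _)

lemma foldl_fmin_le_mem (f : Int → Int) : ∀ (l : List Int) (v0 t : Int), t ∈ l →
    l.foldl (fun a t => min a (f t)) v0 ≤ f t := by
  intro l
  induction l with
  | nil => intro v0 t h; simp at h
  | cons s l ih =>
    intro v0 t h
    rcases List.mem_cons.1 h with h | h
    · subst h
      rw [List.foldl_cons]
      exact le_trans (foldl_fmin_le_init f l _) (min_le_right _ _)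
    · exact ih _ t h

lemma foldl_min_attained (f : Int → Int) : ∀ (l : List Int) (v0 : Int),
    l.foldl (fun a t => min a (f t)) v0 = v0 ∨
    ∃ t ∈ l, l.foldl (fun a t => min a (f t)) v0 = f t := by
  intro l
  induction l with
  | nil => intro v0; left; rfl
  | cons s l ih =>
    intro v0
    rw [List.foldl_cons]
    rcases ih (min v0 (f s)) with h | ⟨t, ht, h⟩
    · rcases le_or_gt v0 (f s) with hle | hlt
      · left; rw [h]; omega
      · right; exact ⟨s, by simp, by rw [h]; omega⟩
    · right; exact ⟨t, by simp [ht], h⟩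

-- ---------- dp rows ----------
lemma row1_ok (arr : List Int) (ha : arr ≠ []) :
    RowOK arr 1 (0 :: PySem.List.pyGetD (costTable arr) 0 []) := by
  intro i hi1 hiN
  have hN : 1 ≤ arr.length := by
    cases arr with
    | nil => exact absurd rfl ha
    | cons a b => simp
  have hc0 := costTable_get arr 0 (by omega)
  rw [Nat.cast_zero] at hc0
  have hs := costRow_spec arr 0 (by omega)
  rw [Nat.cast_zero] at hs
  rw [hc0, hs]
  obtain ⟨i', rfl⟩ : ∃ i', i = i' + 1 := ⟨i - 1, by omega⟩
  have hval : PySem.List.pyGetD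
      (0 :: (List.range (arr.length - 0)).map (fun d => mcost ((arr.drop 0).take (d + 1))))
      ((i' + 1 : Nat) : Int) 0 = mcost (arr.take (i' + 1)) := by
    rw [PySem.List.pyGetD_natCast, List.getD_cons_succ, List.getD_eq_getElem?_getD]
    rw [List.getElem?_map, List.getElem?_range (show i' < arr.length - 0 by omega)]
    simp
  rw [hval]
  have htne : arr.take (i' + 1) ≠ [] := by
    have : (arr.take (i' + 1)).length = min (i' + 1) arr.length := by simp
    intro hcon
    rw [hcon] at this
    simp at this
    omega
  exact ⟨ExactFeas_whole _ htne, fun d hd => ExactFeas_one_min _ d hd⟩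

lemma newRow_get (arr row : List Int) (C : List (List Int)) (j i : Nat)
    (hj : j ≤ i) (hi : i ≤ arr.length) :
    PySem.List.pyGetD (newRow arr row C (j : Int)) (i : Int) 0 =
      innerMin row C (j : Int) (i : Int) := by
  unfold newRow
  simp only [PySem.List.len_eq]
  rw [PySem.List.foldl_append_singleton_eq_map]
  rw [show ((arr.length : Int) + 1) = ((arr.length + 1 : Nat) : Int) from by push_cast; ring]
  rw [PySem.List.pyRange_one]
  rw [show ((((arr.length + 1 : Nat) : Int)) - (j : Int)).toNat = arr.length + 1 - j from by omega]
  rw [PySem.List.pyGetD_natCast, List.getD_eq_getElem?_getD]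
  have hrep : (List.replicate ((j : Int)).toNat (0 : Int)).length = j := by simp
  rw [List.getElem?_append_right (by rw [hrep]; omega), hrep, List.map_map]
  rw [List.getElem?_map, List.getElem?_range (show i - j < arr.length + 1 - j by omega)]
  simp only [Option.map_some, Option.getD_some, Function.comp]
  congr 1
  push_cast
  omega

lemma innerMin_opt (arr row : List Int) (j i : Nat) (hj : 2 ≤ j) (hji : j ≤ i)
    (hiN : i ≤ arr.length) (hrow : RowOK arr (j - 1) row) :
    OptTo arr i j (innerMin row (costTable arr) (j : Int) (i : Int)) := by
  have hlt : (j : Int) - 1 < (i : Int) := by omega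
  rw [innerMin_eq row (costTable arr) _ _ hlt]
  have hcand : ∀ t : Nat, j - 1 ≤ t → t < i →
      candV row (costTable arr) (i : Int) (t : Int) =
        max (PySem.List.pyGetD row (t : Int) 0) (mcost ((arr.drop t).take (i - t))) := by
    intro t h1 h2
    unfold candV
    rw [ctab_get arr t i h2 hiN]
  -- every candidate is feasible, and the result is one of them
  have hfeas : ∀ t : Nat, j - 1 ≤ t → t < i →
      ExactFeas (arr.take i) j (candV row (costTable arr) (i : Int) (t : Int)) := by
    intro t h1 h2
    rw [hcand t h1 h2]
    obtain ⟨hex, _⟩ := hrow t h1 (by omega)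
    have hex' : ExactFeas (arr.take t) (j - 1)
        (max (PySem.List.pyGetD row (t : Int) 0) (mcost ((arr.drop t).take (i - t)))) :=
      ExactFeas_mono _ _ _ _ (le_max_left _ _) hex
    have happ := ExactFeas_append (arr.take t) ((arr.drop t).take (i - t)) (j - 1) _ hex'
      (by
        have : ((arr.drop t).take (i - t)).length = min (i - t) (arr.length - t) := by simp
        intro hcon
        rw [hcon] at this
        simp at this
        omega)
      (le_max_right _ _)
    have hsplit : arr.take t ++ (arr.drop t).take (i - t) = arr.take i := by
      rw [← List.take_add]
      congr 1
      omega
    rw [hsplit] at happ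
    have : j - 1 + 1 = j := by omega
    rwa [this] at happ
  -- lower bound on all candidates
  have hle : ∀ t : Nat, j - 1 ≤ t → t < i →
      (PySem.List.pyRange (j : Int) (i : Int) 1).foldl
        (fun a t => min a (candV row (costTable arr) (i : Int) t))
        (candV row (costTable arr) (i : Int) ((j : Int) - 1)) ≤
        candV row (costTable arr) (i : Int) (t : Int) := by
    intro t h1 h2
    rcases Nat.eq_or_lt_of_le h1 with h1' | h1'
    · rw [show ((t : Int)) = (j : Int) - 1 from by omega]
      exact foldl_fmin_le_init _ _ _
    · exact foldl_fmin_le_mem _ _ _ _ (by rw [PySem.List.mem_pyRange_one]; omega)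
  constructor
  · -- the result is attained at some candidate, hence feasible
    rcases foldl_min_attained (candV row (costTable arr) (i : Int))
      (PySem.List.pyRange (j : Int) (i : Int) 1)
      (candV row (costTable arr) (i : Int) ((j : Int) - 1)) with h | ⟨t, ht, h⟩
    · rw [h]
      have := hfeas (j - 1) (le_refl _) (by omega)
      rwa [show (((j - 1 : Nat)) : Int) = (j : Int) - 1 from by push_cast; omega] at this
    · rw [h]
      rw [PySem.List.mem_pyRange_one] at ht
      have h0t : (0 : Int) ≤ t := by omega
      have := hfeas t.toNat (by omega) (by omega)
      rwa [Int.toNat_of_nonneg h0t] at this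
  · -- minimality
    intro d hd
    obtain ⟨t, ht1, ht2, hex, hcost⟩ :=
      ExactFeas_split arr i (j - 1) d hiN
        (by rwa [show j - 1 + 1 = j from by omega])
    have hrt := (hrow t ht1 (by omega)).2 d hex
    have hub := hle t ht1 ht2
    rw [hcand t ht1 ht2] at hub
    have : max (PySem.List.pyGetD row (t : Int) 0) (mcost ((arr.drop t).take (i - t))) ≤ d :=
      max_le hrt hcost
    omega

lemma newRow_ok (arr row : List Int) (j : Nat) (hj : 2 ≤ j) (hjN : j ≤ arr.length)
    (hrow : RowOK arr (j - 1) row) :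
    RowOK arr j (newRow arr row (costTable arr) (j : Int)) := by
  intro i hji hiN
  rw [newRow_get arr row (costTable arr) j i hji hiN]
  exact innerMin_opt arr row j i hj hji hiN hrow

lemma dpLoop_ok (arr : List Int) (ha : arr ≠ []) (k : Int) (hk1 : 1 ≤ k)
    (hkN : k ≤ (arr.length : Int)) :
    ∀ (fuel : Nat) (j : Nat) (row : List Int) (best : Int), (k + 1 - (j : Int)).toNat ≤ fuel →
      2 ≤ j → (j : Int) ≤ k + 1 → RowOK arr (j - 1) row → BestOK arr (j - 1) best →
      BestOK arr k.toNat (dpLoop arr (costTable arr) k row best (j : Int)) := by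
  intro fuel
  induction fuel with
  | zero =>
    intro j row best hf h2j hjk hrow hbest
    rw [dpLoop, if_neg (by omega)]
    have hjj : j - 1 = k.toNat := by omega
    rwa [← hjj]
  | succ fuel ih =>
    intro j row best hf h2j hjk hrow hbest
    rw [dpLoop]
    by_cases hjk' : (j : Int) ≤ k
    · rw [if_pos hjk']
      simp only [PySem.List.len_eq]
      have hrow' : RowOK arr j (newRow arr row (costTable arr) (j : Int)) :=
        newRow_ok arr row j h2j (by omega) hrow
      have hOpt := hrow' arr.length (by omega) (le_refl _)
      unfold OptTo at hOpt
      rw [List.take_length] at hOpt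
      set r := PySem.List.pyGetD (newRow arr row (costTable arr) (j : Int)) ((arr.length : Nat) : Int) 0 with hr
      obtain ⟨hfeasr, hminr⟩ := hOpt
      have hbest' : BestOK arr j (if r < best then r else best) := by
        obtain ⟨⟨j0, hj01, hj0le, hj0f⟩, hmin⟩ := hbest
        constructor
        · split
          · exact ⟨j, by omega, le_refl _, hfeasr⟩
          · exact ⟨j0, hj01, by omega, hj0f⟩
        · intro j' d h1 h2 hex
          rcases Nat.lt_or_ge j' j with hlt | hge
          · have := hmin j' d h1 (by omega) hex
            split <;> omega
          · have hj' : j' = j := by omega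
            subst hj'
            have := hminr d hex
            split <;> omega
      have hrec := ih (j + 1) (newRow arr row (costTable arr) (j : Int))
        (if r < best then r else best) (by omega) (by omega) (by push_cast; omega)
        (by simpa using hrow') (by simpa using hbest')
      rw [show ((j : Int) + 1) = ((j + 1 : Nat) : Int) from by push_cast; ring]
      exact hrec
    · rw [if_neg hjk']
      have hjj : j - 1 = k.toNat := by omega
      rwa [← hjj]

-- ---------- assembling both sides ----------
lemma best_props (n m : Int) (arr : List Int) (ha : arr ≠ []) (hm : 1 ≤ m) :
    BestOK arr (if m < (arr.length : Int) then m else (arr.length : Int)).toNat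
      (solve_alt n m arr) := by
  have hN : 1 ≤ arr.length := by
    cases arr with
    | nil => exact absurd rfl ha
    | cons a b => simp
  unfold solve_alt
  simp only [PySem.List.len_eq]
  set k := if m < (arr.length : Int) then m else (arr.length : Int) with hk
  have hk1 : 1 ≤ k := by rw [hk]; split <;> omega
  have hkN : k ≤ (arr.length : Int) := by rw [hk]; split <;> omega
  rw [if_neg (by omega)]
  have hrow1 := row1_ok arr ha
  have hb0 := hrow1 arr.length (by omega) (le_refl _)
  unfold OptTo at hb0
  rw [List.take_length] at hb0
  have hbest0 : BestOK arr 1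
      (PySem.List.pyGetD (0 :: PySem.List.pyGetD (costTable arr) 0 []) ((arr.length : Nat) : Int) 0) := by
    refine ⟨⟨1, le_refl _, le_refl _, hb0.1⟩, ?_⟩
    intro j' d h1 h2 hex
    have hj' : j' = 1 := by omega
    subst hj'
    exact hb0.2 d hex
  have hfin := dpLoop_ok arr ha k hk1 hkN ((k + 1 - 2).toNat + 1) 2 _ _ (by omega)
    (le_refl _) (by omega) (by simpa using hrow1) (by simpa using hbest0)
  simpa using hfin

lemma solve_unfold (n m a0 : Int) (rest : List Int) :
    solve n m (a0 :: rest) =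
      bsearchA (a0 :: rest) m 0 (mcost (a0 :: rest)) (mcost (a0 :: rest)) := by
  unfold solve
  rw [PySem.List.max?_id_cons, PySem.List.min?_id_cons]
  rfl

theorem solve_eq_alt (n m : Int) (arr : List Int) (ha : arr ≠ []) (hm : 1 ≤ m) :
    solve n m arr = solve_alt n m arr := by
  have hN : 1 ≤ arr.length := by
    cases arr with
    | nil => exact absurd rfl ha
    | cons a b => simp
  have hbest := best_props n m arr ha hm
  set k := if m < (arr.length : Int) then m else (arr.length : Int) with hk
  have hk1 : 1 ≤ k := by rw [hk]; split <;> omega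
  have hkN : k ≤ (arr.length : Int) := by rw [hk]; split <;> omega
  have hkm : k ≤ m := by rw [hk]; split <;> omega
  have hkmin : ∀ x : Int, x ≤ m → x ≤ (arr.length : Int) → x ≤ k := by
    intro x h1 h2
    rw [hk]
    split <;> omega
  set best := solve_alt n m arr with hbestdef
  obtain ⟨⟨j0, hj01, hj0k, hj0f⟩, hminb⟩ := hbest
  have h0best : 0 ≤ best := ExactFeas_nonneg arr j0 best ha hj0f
  have hfeasb : Feas arr m best := ⟨j0, hj01, by omega, hj0f⟩
  have hleast : ∀ d : Int, 0 ≤ d → d < best → canDivide arr m d ≠ true := by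
    intro d h0 hlt hcd
    rw [canDivide_iff arr m d ha h0] at hcd
    obtain ⟨j', h1, h2, hex⟩ := hcd
    have hj'N : j' ≤ arr.length := ExactFeas_le_length _ _ _ hex
    have hj'k : (j' : Int) ≤ k := hkmin _ h2 (by omega)
    have := hminb j' d h1 (by omega) hex
    omega
  have hP : canDivide arr m best = true := (canDivide_iff arr m best ha h0best).2 hfeasb
  have hmono : ∀ d d' : Int, 0 ≤ d → d ≤ d' → canDivide arr m d = true →
      canDivide arr m d' = true := by
    intro d d' h0 hdd hcd
    rw [canDivide_iff arr m d ha h0] at hcd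
    obtain ⟨j', h1, h2, hex⟩ := hcd
    exact (canDivide_iff arr m d' ha (by omega)).2 ⟨j', h1, h2, ExactFeas_mono _ _ _ _ hdd hex⟩
  have hbR : best ≤ mcost arr :=
    hminb 1 (mcost arr) (le_refl _) (by omega) (ExactFeas_whole arr ha)
  obtain ⟨a0, rest, rfl⟩ : ∃ a b, arr = a :: b := by
    cases arr with
    | nil => exact absurd rfl ha
    | cons a b => exact ⟨a, b, rfl⟩
  rw [solve_unfold]
  exact bsearch_eq (a0 :: rest) m best h0best hP hleast hmono
    (mcost (a0 :: rest) + 1).toNat 0 (mcost (a0 :: rest)) (mcost (a0 :: rest))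
    (by omega) (le_refl _) h0best (by omega)

-- ===== VERDICT (by name: the statement is the Claim_ definition above) =====
theorem solve_spec : Claim_equal_solve := by
  intro n m arr hdom hpre
  obtain ⟨h1, h2⟩ := hpre
  unfold Spec_solve
  exact solve_eq_alt n m arr h1 h2
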